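-- pv_equiv track=rewrite | github.com/tohma0118/research_program | analyze/blood_analyze/create_data_for_nn.py | make_target_flag
-- ===== SOURCE A (Python) =====
-- CIRCLE_PERIOD = 3
--
-- def make_target_flag(target_time, x_time):
--     target_flag = [0] * len(x_time)
--
--     for i, t in enumerate(x_time):
--         for target_value in target_time:
--             if target_value <= t <= target_value + CIRCLE_PERIOD:
--                 target_flag[i] = 1
--                 break
--
--     return target_flag
-- ===== SOURCE B (Python) =====
-- CIRCLE_PERIOD = 3
--
--
-- def _bisect_left(a, x):
--     lo, hi = 0, len(a)
--     while lo < hi: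
--         mid = (lo + hi) // 2
--         if a[mid] < x:
--             lo = mid + 1
--         else:
--             hi = mid
--     return lo
--
--
-- def make_target_flag(target_time, x_time):
--     s = sorted(target_time)
--     flags = []
--     for t in x_time:
--         i = _bisect_left(s, t - CIRCLE_PERIOD)
--         flags.append(1 if i < len(s) and s[i] <= t else 0)
--     return flags
-- ===== Notes on version B (the rewrite author's own statement) =====
-- stated objective: faster
-- what changed: Replaces A's linear scan of target_time per x_time element with sorting target_time once and a binary search (bisect_left) for a value in [t-3, t] per element.
import Mathlib
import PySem

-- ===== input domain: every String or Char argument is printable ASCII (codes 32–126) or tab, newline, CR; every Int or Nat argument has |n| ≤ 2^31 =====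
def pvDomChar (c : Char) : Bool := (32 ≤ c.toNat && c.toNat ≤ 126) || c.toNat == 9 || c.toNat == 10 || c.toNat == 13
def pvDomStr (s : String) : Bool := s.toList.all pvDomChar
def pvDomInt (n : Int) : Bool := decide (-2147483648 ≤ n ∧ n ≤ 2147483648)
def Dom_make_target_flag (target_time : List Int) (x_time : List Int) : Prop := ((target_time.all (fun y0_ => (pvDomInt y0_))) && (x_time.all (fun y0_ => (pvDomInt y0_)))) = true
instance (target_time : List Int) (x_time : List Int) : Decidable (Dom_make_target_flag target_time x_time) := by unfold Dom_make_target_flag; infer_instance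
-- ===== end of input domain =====

-- B replaces A's inner scan over target_time by sorting target_time once and binary-searching
-- per t for a value in [t-3, t] (objective: faster, O((n+m) log m) vs O(n*m)).

-- ===== PORT A =====
-- inner 'for target_value in target_time: if …: set flag; break' — true iff the loop breaks
def mtfInner (t : Int) : List Int → Bool
  | [] => false
  | v :: rest => if v ≤ t ∧ t ≤ v + 3 then true else mtfInner t rest

def make_target_flag (target_time : List Int) (x_time : List Int) : List Int :=
  let target_flag := List.replicate x_time.length 0
  (PySem.List.enumerate x_time).foldl
    (fun acc p =>
      -- enumerate starts at 0, so the index p.1 is nonnegative and toNat is exact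
      if mtfInner p.2 target_time then acc.set p.1.toNat 1 else acc)
    target_flag

-- ===== PORT B =====
-- Source B's _bisect_left is CPython's bisect_left loop; PySem.List.bisectLeft is that loop verbatim
def make_target_flag_alt (target_time : List Int) (x_time : List Int) : List Int :=
  let s := PySem.List.sorted target_time (fun v => v) false
  x_time.foldl
    (fun flags t =>
      let i := PySem.List.bisectLeft s (t - 3)
      flags ++ [if h : i < s.length then (if s[i] ≤ t then (1 : Int) else 0) else 0])
    []

-- ===== PRECONDITION & SPEC =====
def Spec_make_target_flag (target_time : List Int) (x_time : List Int) (out : List Int) : Prop := out = make_target_flag_alt target_time x_time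
instance (target_time : List Int) (x_time : List Int) (out : List Int) : Decidable (Spec_make_target_flag target_time x_time out) := by unfold Spec_make_target_flag; infer_instance

-- ===== CLAIM (what is proved, stated in full; the proofs are below) =====
def Claim_equal_make_target_flag : Prop := ∀ (target_time : List Int) (x_time : List Int), Dom_make_target_flag target_time x_time → Spec_make_target_flag target_time x_time (make_target_flag target_time x_time)

-- ===== LEMMAS AND PROOFS =====

-- A's inner loop breaks iff some target value covers t
theorem mtfInner_iff (t : Int) (tt : List Int) :
    mtfInner t tt = true ↔ ∃ v ∈ tt, v ≤ t ∧ t ≤ v + 3 := by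
  induction tt with
  | nil => simp [mtfInner]
  | cons v rest ih =>
    by_cases h : v ≤ t ∧ t ≤ v + 3 <;> simp [mtfInner, h, ih]

-- setting index pre.length in pre ++ a :: l
theorem set_append_length {α : Type} (pre : List α) (a b : α) (l : List α) :
    (pre ++ a :: l).set pre.length b = pre ++ b :: l := by
  induction pre with
  | nil => simp
  | cons x xs ih => simp [ih]

-- A's indexed fold over enumerate is a map
theorem foldA (tt : List Int) (xs : List Int) (pre : List Int) :
    (PySem.List.enumerate xs (pre.length : Int)).foldl
      (fun acc p => if mtfInner p.2 tt then acc.set p.1.toNat 1 else acc)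
      (pre ++ List.replicate xs.length 0)
    = pre ++ xs.map (fun t => if mtfInner t tt then (1 : Int) else 0) := by
  induction xs generalizing pre with
  | nil => simp [PySem.List.enumerate_nil]
  | cons t rest ih =>
    rw [PySem.List.enumerate_cons]
    simp only [List.foldl_cons, List.length_cons, List.replicate_succ]
    have hacc : (if mtfInner t tt then
        (pre ++ (0 : Int) :: List.replicate rest.length 0).set ((pre.length : Int)).toNat 1
        else pre ++ (0 : Int) :: List.replicate rest.length 0)
        = (pre ++ [if mtfInner t tt then (1 : Int) else 0]) ++ List.replicate rest.length 0 := by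
      by_cases h : mtfInner t tt = true
      · simp only [h, if_true, Int.toNat_natCast, set_append_length]
        simp
      · simp only [h]
        simp
    rw [hacc]
    have hlen : ((pre.length : Int)) + 1 = (((pre ++ [if mtfInner t tt then (1 : Int) else 0]).length : Nat) : Int) := by
      simp
    rw [hlen, ih]
    simp

-- pointwise: B's binary-search test equals A's linear scan
theorem flag_eq (tt : List Int) (t : Int) :
    (if h : PySem.List.bisectLeft (PySem.List.sorted tt (fun v => v) false) (t - 3)
            < (PySem.List.sorted tt (fun v => v) false).length then
       (if (PySem.List.sorted tt (fun v => v) false)[PySem.List.bisectLeft (PySem.List.sorted tt (fun v => v) false) (t - 3)] ≤ t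
        then (1 : Int) else 0)
     else 0)
    = (if mtfInner t tt then (1 : Int) else 0) := by
  set s := PySem.List.sorted tt (fun v => v) false with hs
  have hpair : List.Pairwise (fun a b => a ≤ b) s := by
    rw [hs]; exact PySem.List.sorted_pairwise (xs := tt) (key := fun v : Int => v)
  obtain ⟨hle, hlt, hge⟩ := PySem.List.bisectLeft_spec s (t - 3) hpair
  set i := PySem.List.bisectLeft s (t - 3) with hi
  have hmem : ∀ v : Int, v ∈ s ↔ v ∈ tt := by
    intro v; rw [hs]; exact PySem.List.mem_sorted tt (fun v => v) false v
  by_cases hex : ∃ v ∈ tt, v ≤ t ∧ t ≤ v + 3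
  · -- some v with t - 3 ≤ v ≤ t exists: the search must land on an element ≤ t
    obtain ⟨v, hv, hv1, hv2⟩ := hex
    obtain ⟨j, hj, hjv⟩ := List.getElem_of_mem ((hmem v).2 hv)
    have hij : i ≤ j := by
      by_contra hc
      have := hlt j hj (by omega)
      omega
    have hilen : i < s.length := lt_of_le_of_lt hij hj
    have hsi : s[i] ≤ t := by
      have hmono : s[i] ≤ s[j] := by
        have := PySem.List.sorted_id_getElem_mono (xs := tt) (p := i) (q := j) hij (by rw [← hs]; exact hj)
        simpa [← hs] using this
      omega
    have hm : mtfInner t tt = true := (mtfInner_iff t tt).2 ⟨v, hv, by omega, by omega⟩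
    rw [dif_pos hilen, if_pos hsi, if_pos hm]
  · -- no covering value: either i = length, or s[i] > t
    have hm : ¬ mtfInner t tt = true := by
      rw [mtfInner_iff]; exact hex
    by_cases hilen : i < s.length
    · have h2 : ¬ s[i] ≤ t := by
        intro hc
        have h1 : t - 3 ≤ s[i] := hge i hilen (le_refl i)
        exact hex ⟨s[i], (hmem _).1 (List.getElem_mem hilen), by omega, by omega⟩
      rw [dif_pos hilen, if_neg h2, if_neg hm]
    · rw [dif_neg hilen, if_neg hm]

-- ===== VERDICT (by name: the statement is the Claim_ definition above) =====
theorem make_target_flag_spec : Claim_equal_make_target_flag := by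
  intro tt xs _
  unfold Spec_make_target_flag make_target_flag make_target_flag_alt
  have hA := foldA tt xs []
  simp only [List.length_nil, Nat.cast_zero, List.nil_append] at hA
  rw [hA]
  show _ = List.foldl _ []  xs
  rw [PySem.List.foldl_append_singleton_eq_map]
  simp only [List.nil_append]
  apply List.map_congr_left
  intro t _
  exact (flag_eq tt t).symm
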